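-- pv_equiv track=rewrite | github.com/izidoromth/csi30_projeto_condutor | main.py | combina
-- ===== SOURCE A (Python) =====
-- def combina(cross1, cross2, p):
--     filho1 = cross1.copy()
--     filho2 = cross2.copy()
--
--     for i in range(0, p):
--         filho1[i] = cross2[i]
--
--     j = 0
--     for i in range(p, len(cross2)):
--         if filho1[i] in filho1[0:p:]:
--             for w in range(j,len(cross1)):
--                 if not (cross1[w] in filho1):
--                     filho1[i] = cross1[w]
--                     break
--             j = j+1
--
--     for i in range(0, p):
--         filho2[i] = cross1[i]
--
--     j = 0
--     for i in range(p, len(cross1)):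
--         if filho2[i] in filho2[0:p:]:
--             for w in range(j,len(cross2)):
--                 if not (cross2[w] in filho2):
--                     filho2[i] = cross2[w]
--                     break
--             j = j+1
--
--     return filho1, filho2
-- ===== SOURCE B (Python) =====
-- def combina(cross1, cross2, p):
--     # One-pass repair: a 'used' set plus a monotone pointer w replace A's nested
--     # rescans (list membership inside an inner index scan).
--     def repair(x, y):
--         n = len(x)
--         child = y[:p] + x[p:]
--         prefix = set(y[:p])
--         used = set(child)
--         w = 0
--         for i in range(p, len(y)):
--             if child[i] in prefix:
--                 while w < n and x[w] in used:
--                     w += 1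
--                 if w < n:
--                     child[i] = x[w]
--                     used.add(x[w])
--                     w += 1
--         return child
--     return repair(cross1, cross2), repair(cross2, cross1)
-- ===== Notes on version B (the rewrite author's own statement) =====
-- stated objective: faster
-- what changed: Replaces A's nested repair (for each clashing slot, rescan the parent from index j with an O(n) list-membership test inside) by a single pass that keeps a set of values already present in the child and a monotone pointer w into the parent, so each repair is found in amortised O(1).
-- outside the precondition, e.g. on combina([1, 2, 3], [3, 1, 2], -1): A returns ([1, 2, 3], [3, 1, 2]), B returns ([3, 1, 2], [1, 2, 3])
import Mathlib
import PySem

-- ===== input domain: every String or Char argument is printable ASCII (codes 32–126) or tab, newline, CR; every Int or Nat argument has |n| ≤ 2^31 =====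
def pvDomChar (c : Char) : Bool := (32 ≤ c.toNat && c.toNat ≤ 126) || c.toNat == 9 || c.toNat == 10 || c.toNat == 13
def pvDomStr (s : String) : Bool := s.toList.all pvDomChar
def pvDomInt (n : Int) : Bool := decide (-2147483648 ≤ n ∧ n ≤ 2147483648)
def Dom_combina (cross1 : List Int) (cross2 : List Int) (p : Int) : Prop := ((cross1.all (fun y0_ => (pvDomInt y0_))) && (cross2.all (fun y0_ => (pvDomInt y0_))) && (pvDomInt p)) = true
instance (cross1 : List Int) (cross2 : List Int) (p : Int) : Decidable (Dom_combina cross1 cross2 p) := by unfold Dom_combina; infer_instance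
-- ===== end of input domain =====

-- B replaces A's nested repair rescans by a one-pass set-plus-pointer repair (measured faster asymptotically).


-- ===== PORT A =====
-- inner 'for w in range(j, len(x)): if not (x[w] in filho): filho[i] = x[w]; break'
-- ported as a first-hit scan returning the found index (none = loop ran out).
def scanA (x f : List Int) (w : Int) : Option Int :=
  if _h : w < (x.length : Int) then
    if f.contains (PySem.List.pyGetD x w 0) then scanA x f (w + 1) else some w
  else none
termination_by ((x.length : Int) - w).toNat
decreasing_by omega

-- one iteration of A's repair loop (state: current child list, j); indexing is via
-- pyGetD/pySetD, exact under Pre_ (all indices in range, so Python raises nowhere).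
def stepA (x : List Int) (p : Int) (s : List Int × Int) (i : Int) : List Int × Int :=
  let f := s.1
  let j := s.2
  if (PySem.List.slice f (some 0) (some p)).contains (PySem.List.pyGetD f i 0) then
    match scanA x f j with
    | some w => (PySem.List.pySetD f i (PySem.List.pyGetD x w 0), j + 1)
    | none => (f, j + 1)
  else (f, j)

def combina (cross1 : List Int) (cross2 : List Int) (p : Int) : List Int × List Int :=
  let filho1 := (PySem.List.pyRange 0 p).foldl
    (fun f i => PySem.List.pySetD f i (PySem.List.pyGetD cross2 i 0)) cross1
  let r1 := (PySem.List.pyRange p (cross2.length : Int)).foldl (stepA cross1 p) (filho1, 0)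
  let filho2 := (PySem.List.pyRange 0 p).foldl
    (fun f i => PySem.List.pySetD f i (PySem.List.pyGetD cross1 i 0)) cross2
  let r2 := (PySem.List.pyRange p (cross1.length : Int)).foldl (stepA cross2 p) (filho2, 0)
  (r1.1, r2.1)

-- ===== PORT B =====
-- 'while w < n and x[w] in used: w += 1'
def advB (x used : List Int) (n : Nat) (w : Nat) : Nat :=
  if w < n && used.contains (x.getD w 0) then advB x used n (w + 1) else w
termination_by n - w
decreasing_by simp only [Bool.and_eq_true, decide_eq_true_eq] at *; omega

-- one iteration of B's repair loop (state: child, used set, pointer w)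
def stepB (x : List Int) (pre : List Int) (n : Nat) (s : List Int × List Int × Nat)
    (i : Int) : List Int × List Int × Nat :=
  let child := s.1
  let used := s.2.1
  let w := s.2.2
  if pre.contains (PySem.List.pyGetD child i 0) then
    let w' := advB x used n w
    if w' < n then
      (PySem.List.pySetD child i (x.getD w' 0), PySem.Set.add used (x.getD w' 0), w' + 1)
    else (child, used, w')
  else (child, used, w)

def repairB (x y : List Int) (p : Int) : List Int :=
  let n := x.length
  let child := PySem.List.slice y none (some p) ++ PySem.List.slice x (some p) none
  let pre := PySem.Set.ofList (PySem.List.slice y none (some p))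
  let used := PySem.Set.ofList child
  ((PySem.List.pyRange p (y.length : Int)).foldl (stepB x pre n) (child, used, 0)).1

def combina_alt (cross1 : List Int) (cross2 : List Int) (p : Int) : List Int × List Int :=
  (repairB cross1 cross2 p, repairB cross2 cross1 p)

-- ===== PRECONDITION & SPEC =====
-- Pre_ excludes unequal lengths and p > len (A raises IndexError there) and negative p,
-- which is outside the natural domain of a crossover point: A returns an accidental
-- negative-index-wraparound value there and our B happens to wrap differently.
def Pre_combina (cross1 : List Int) (cross2 : List Int) (p : Int) : Prop :=
  cross1.length = cross2.length ∧ 0 ≤ p ∧ p ≤ (cross1.length : Int)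
instance (cross1 : List Int) (cross2 : List Int) (p : Int) : Decidable (Pre_combina cross1 cross2 p) := by unfold Pre_combina; infer_instance

def pvWitness_combina : List Int × List Int × Int := ([1, 2, 3], [3, 1, 2], 1)

def Spec_combina (cross1 : List Int) (cross2 : List Int) (p : Int) (out : List Int × List Int) : Prop := out = combina_alt cross1 cross2 p
instance (cross1 : List Int) (cross2 : List Int) (p : Int) (out : List Int × List Int) : Decidable (Spec_combina cross1 cross2 p out) := by unfold Spec_combina; infer_instance

-- ===== CLAIM (what is proved, stated in full; the proofs are below) =====
def Claim_equal_combina : Prop := ∀ (cross1 : List Int) (cross2 : List Int) (p : Int), Dom_combina cross1 cross2 p → Pre_combina cross1 cross2 p → Spec_combina cross1 cross2 p (combina cross1 cross2 p)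

-- ===== LEMMAS AND PROOFS =====

-- loop invariant relating A's repair state (child, j) to B's (child, used, w)
def RelAB (x y : List Int) (p : Int) (sa : List Int × Int) (sb : List Int × List Int × Nat) : Prop :=
  sa.1 = sb.1 ∧
  sb.1.take p.toNat = y.take p.toNat ∧
  sb.1.length = x.length ∧
  (∀ z : Int, z ∈ sb.2.1 ↔ z ∈ sb.1) ∧
  0 ≤ sa.2 ∧
  sb.2.2 ≤ x.length ∧
  (∀ k : Nat, sa.2 ≤ (k : Int) → k < sb.2.2 → x.getD k 0 ∈ sb.1) ∧
  (sa.2 ≤ (sb.2.2 : Int) ∨ sb.2.2 = x.length)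

theorem take_set_of_le (l : List Int) (k : Nat) (v : Int) (m : Nat) (h : m ≤ k) :
    (l.set k v).take m = l.take m := by
  apply List.ext_getElem
  · simp
  · intro i h1 h2
    simp only [List.length_take] at h2
    have him : i < m := lt_of_lt_of_le h2 (min_le_left _ _)
    rw [List.getElem_take, List.getElem_take]
    exact List.getElem_set_ne (by omega) (by simp; omega)

theorem mem_set_iff (f : List Int) (k pn : Nat) (v : Int) (hk : k < f.length) (hpk : pn ≤ k)
    (hpref : f[k] ∈ f.take pn) : ∀ z : Int, z ∈ f.set k v ↔ z ∈ f ∨ z = v := by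
  intro z
  constructor
  · exact List.mem_or_eq_of_mem_set
  · intro hz
    rcases hz with hz | hz
    · obtain ⟨m, hm, hzm⟩ := List.getElem_of_mem hz
      by_cases hmk : m = k
      · have hzk : z = f[k] := by subst hmk; exact hzm.symm
        have hmem2 : z ∈ (f.set k v).take pn := by
          rw [take_set_of_le f k v pn hpk, hzk]
          exact hpref
        exact List.mem_of_mem_take hmem2
      · have h1 : m < (f.set k v).length := by simpa using hm
        have h2 : (f.set k v)[m] = f[m] := List.getElem_set_ne (fun h => hmk h.symm) h1
        rw [← hzm, ← h2]
        exact List.getElem_mem h1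
    · have h1 : k < (f.set k v).length := by simpa using hk
      have h2 : (f.set k v)[k] = v := List.getElem_set_self (by simpa using hk)
      have h3 := List.getElem_mem h1
      rw [h2] at h3
      rw [hz]
      exact h3

theorem advB_spec (x used : List Int) (n : Nat) : ∀ (w : Nat), w ≤ n →
    w ≤ advB x used n w ∧ advB x used n w ≤ n ∧
    (∀ k, w ≤ k → k < advB x used n w → used.contains (x.getD k 0) = true) ∧
    (advB x used n w < n → used.contains (x.getD (advB x used n w) 0) = false) := by
  intro w
  induction' hd : n - w with d ih generalizing w
  · intro hw
    have hwn : w = n := by omega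
    rw [advB, if_neg (by simp [hwn])]
    refine ⟨le_refl _, hw, ?_, ?_⟩
    · intro k h1 h2
      exact absurd h2 (by omega)
    · intro h
      exact absurd h (by simp [hwn])
  · intro hw
    rw [advB]
    by_cases hcond : (w < n && used.contains (x.getD w 0)) = true
    · simp only [hcond, if_true]
      have hw1 : w + 1 ≤ n := by
        simp only [Bool.and_eq_true, decide_eq_true_eq] at hcond; omega
      obtain ⟨h1, h2, h3, h4⟩ := ih (w + 1) (by omega) hw1
      refine ⟨by omega, h2, ?_, h4⟩
      intro k hk1 hk2
      rcases Nat.eq_or_lt_of_le hk1 with h | h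
      · subst h
        simp only [Bool.and_eq_true, decide_eq_true_eq] at hcond
        exact hcond.2
      · exact h3 k h hk2
    · rw [if_neg hcond]
      refine ⟨le_refl _, hw, ?_, ?_⟩
      · intro k h1 h2
        exact absurd h2 (by omega)
      · intro hwn
        simp only [Bool.and_eq_true, decide_eq_true_eq, not_and] at hcond
        simpa using hcond hwn

theorem scanA_adv (x f used : List Int) (hmem : ∀ z : Int, z ∈ used ↔ z ∈ f) :
    ∀ (w : Nat), w ≤ x.length →
    scanA x f (w : Int) =
      (if advB x used x.length w < x.length then some ((advB x used x.length w : Nat) : Int)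
       else none) := by
  intro w
  induction' hd : x.length - w with d ih generalizing w
  · intro hw
    have hwn : w = x.length := by omega
    rw [scanA, advB]
    simp [hwn]
  · intro hw
    have hwlt : w < x.length := by omega
    rw [scanA, advB]
    have hget : PySem.List.pyGetD x (w : Int) 0 = x.getD w 0 := PySem.List.pyGetD_natCast x w 0
    by_cases hc : f.contains (x.getD w 0) = true
    · have hu : used.contains (x.getD w 0) = true := by
        rw [List.contains_iff_mem] at hc ⊢
        exact (hmem _).mpr hc
      simp only [hget, hc, hu, hwlt, decide_true, Bool.true_and, if_true]
      rw [dif_pos (by exact_mod_cast hwlt)]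
      have : (w : Int) + 1 = ((w + 1 : Nat) : Int) := by push_cast; ring
      rw [this]
      exact ih (w + 1) (by omega) (by omega)
    · have hu : used.contains (x.getD w 0) = false := by
        rw [Bool.eq_false_iff]
        intro h
        rw [List.contains_iff_mem] at h
        exact hc (by rw [List.contains_iff_mem]; exact (hmem _).mp h)
      simp only [hget, hc, hu, hwlt, decide_true, Bool.true_and, Bool.false_eq_true, if_false]
      rw [dif_pos (by exact_mod_cast hwlt)]
      simp

theorem scanA_skip (x f : List Int) : ∀ (d : Nat) (j : Int) (w : Nat), 0 ≤ j →
    j + d = (w : Int) → w ≤ x.length →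
    (∀ k : Nat, j ≤ (k : Int) → k < w → x.getD k 0 ∈ f) →
    scanA x f j = scanA x f (w : Int) := by
  intro d
  induction' d with d ih
  · intro j w _ hjd _ _
    rw [show j = ((w : Nat) : Int) by omega]
  · intro j w hj hjd hw hskip
    have hjw : j < (w : Int) := by omega
    have hjlt : j < (x.length : Int) := by omega
    rw [scanA, dif_pos hjlt]
    have hjn : j = ((j.toNat : Nat) : Int) := by omega
    have hget : PySem.List.pyGetD x j 0 = x.getD j.toNat 0 := by
      rw [hjn]; exact PySem.List.pyGetD_natCast x j.toNat 0
    have hmem : x.getD j.toNat 0 ∈ f := hskip j.toNat (by omega) (by omega)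
    rw [hget, if_pos (by rw [List.contains_iff_mem]; exact hmem)]
    exact ih (j + 1) w (by omega) (by omega) hw
      (fun k hk1 hk2 => hskip k (by omega) hk2)

theorem scanA_eq (x f used : List Int) (hmem : ∀ z : Int, z ∈ used ↔ z ∈ f) (j : Int)
    (hj : 0 ≤ j) (w : Nat) (hw : w ≤ x.length)
    (hskip : ∀ k : Nat, j ≤ (k : Int) → k < w → x.getD k 0 ∈ f)
    (hjw : j ≤ (w : Int) ∨ w = x.length) :
    scanA x f j =
      (if advB x used x.length w < x.length then some ((advB x used x.length w : Nat) : Int)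
       else none) := by
  by_cases hle : j ≤ (w : Int)
  · rw [scanA_skip x f (((w : Int) - j).toNat) j w hj (by omega) hw hskip]
    exact scanA_adv x f used hmem w hw
  · have hwn : w = x.length := by tauto
    have hjn : (x.length : Int) < j := by omega
    rw [scanA, dif_neg (by omega)]
    subst hwn
    rw [advB]
    simp

theorem step_rel (x y : List Int) (p i : Int) (hp0 : 0 ≤ p) (hpi : p ≤ i)
    (hin : i < (x.length : Int)) (sa : List Int × Int) (sb : List Int × List Int × Nat)
    (h : RelAB x y p sa sb) :
    RelAB x y p (stepA x p sa i) (stepB x (PySem.Set.ofList (y.take p.toNat)) x.length sb i) := by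
  rcases sa with ⟨f, j⟩
  rcases sb with ⟨c, used, w⟩
  obtain ⟨h1, h2, h3, h4, h5, h6, h7, h8⟩ := h
  dsimp only at h1 h2 h3 h4 h5 h6 h7 h8
  subst h1
  have hi0 : 0 ≤ i := le_trans hp0 hpi
  have hit : ((i.toNat : Nat) : Int) = i := by omega
  have hitlen : i.toNat < x.length := by omega
  have hitf : i.toNat < f.length := by omega
  have hpnit : p.toNat ≤ i.toNat := by omega
  have hslice : PySem.List.slice f (some 0) (some p) = f.take p.toNat := by
    rw [PySem.List.slice_zero_start, PySem.List.slice_to f hp0]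
  have hgetf : PySem.List.pyGetD f i 0 = f.getD i.toNat 0 := by
    conv_lhs => rw [← hit]
    exact PySem.List.pyGetD_natCast f i.toNat 0
  have hsetf : ∀ v : Int, PySem.List.pySetD f i v = f.set i.toNat v := by
    intro v
    conv_lhs => rw [← hit]
    exact PySem.List.pySetD_natCast f i.toNat v
  have hgd : f.getD i.toNat 0 = f[i.toNat] := List.getD_eq_getElem f 0 hitf
  have hcondA : (f.take p.toNat).contains (PySem.List.pyGetD f i 0)
      = List.contains (PySem.Set.ofList (y.take p.toNat)) (PySem.List.pyGetD f i 0) := by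
    rw [h2, Bool.eq_iff_iff, List.contains_iff_mem, List.contains_iff_mem]
    exact (PySem.Set.mem_ofList _ _).symm
  simp only [stepA, stepB]
  rw [hslice]
  by_cases hc : List.contains (PySem.Set.ofList (y.take p.toNat)) (PySem.List.pyGetD f i 0) = true
  · have hcA : (f.take p.toNat).contains (PySem.List.pyGetD f i 0) = true := by
      rw [hcondA]; exact hc
    simp only [hcA, hc, if_true]
    have hpref : f[i.toNat] ∈ f.take p.toNat := by
      rw [List.contains_iff_mem, hgetf, hgd] at hcA
      exact hcA
    have hscan := scanA_eq x f used h4 j h5 w h6 h7 h8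
    obtain ⟨ha1, ha2, ha3, ha4⟩ := advB_spec x used x.length w h6
    by_cases hlt : advB x used x.length w < x.length
    · rw [hscan, if_pos hlt, if_pos hlt]
      dsimp only
      have hgetv : PySem.List.pyGetD x ((advB x used x.length w : Nat) : Int) 0
          = x.getD (advB x used x.length w) 0 := PySem.List.pyGetD_natCast _ _ _
      rw [hgetv, hsetf]
      have hjw : j ≤ (w : Int) := by
        rcases h8 with h8 | h8
        · exact h8
        · exfalso; omega
      refine ⟨rfl, ?_, ?_, ?_, by omega, by dsimp only; omega, ?_, ?_⟩
      · dsimp only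
        rw [take_set_of_le f i.toNat _ p.toNat hpnit, h2]
      · simp [h3]
      · dsimp only
        intro z
        rw [PySem.Set.mem_add,
          mem_set_iff f i.toNat p.toNat _ hitf hpnit hpref z, h4 z]
      · dsimp only
        intro k hk1 hk2
        rw [mem_set_iff f i.toNat p.toNat _ hitf hpnit hpref]
        by_cases hkw : k = advB x used x.length w
        · right; rw [hkw]
        · left
          by_cases hkw2 : k < w
          · exact h7 k (by omega) hkw2
          · have hku := ha3 k (by omega) (by omega)
            rw [List.contains_iff_mem] at hku
            exact (h4 _).mp hku
      · dsimp only
        left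
        omega
    · rw [hscan, if_neg hlt, if_neg hlt]
      dsimp only
      have hw' : advB x used x.length w = x.length := by omega
      refine ⟨rfl, h2, h3, h4, by omega, by dsimp only; omega, ?_, Or.inr hw'⟩
      dsimp only
      intro k hk1 hk2
      by_cases hkw2 : k < w
      · exact h7 k (by omega) hkw2
      · have hku := ha3 k (by omega) (by omega)
        rw [List.contains_iff_mem] at hku
        exact (h4 _).mp hku
  · have hcf : List.contains (PySem.Set.ofList (y.take p.toNat)) (PySem.List.pyGetD f i 0)
        = false := Bool.not_eq_true _ |>.mp hc
    have hcAf : (f.take p.toNat).contains (PySem.List.pyGetD f i 0) = false := by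
      rw [hcondA]; exact hcf
    simp only [hcAf, hcf, Bool.false_eq_true, if_false]
    exact ⟨rfl, h2, h3, h4, h5, h6, h7, h8⟩

theorem fold_rel (x y : List Int) (p : Int) :
    ∀ (L : List Int), (∀ i ∈ L, p ≤ i ∧ i < (x.length : Int)) → 0 ≤ p →
    ∀ sa sb, RelAB x y p sa sb →
    RelAB x y p (L.foldl (stepA x p) sa)
      (L.foldl (stepB x (PySem.Set.ofList (y.take p.toNat)) x.length) sb) := by
  intro L
  induction' L with i L ih
  · intro _ _ sa sb h
    exact h
  · intro hb hp0 sa sb h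
    simp only [List.foldl_cons]
    exact ih (fun i hi => hb i (List.mem_cons_of_mem _ hi)) hp0 _ _
      (step_rel x y p i hp0 (hb i (List.mem_cons_self)).1 (hb i (List.mem_cons_self)).2 sa sb h)

theorem copyNat (y x : List Int) : ∀ (m : Nat), m ≤ x.length → m ≤ y.length →
    (List.range m).foldl (fun f k => f.set k (y.getD k 0)) x = y.take m ++ x.drop m := by
  intro m
  induction' m with m ih <;> intro hx hy
  · simp
  · rw [List.range_succ, List.foldl_append, ih (by omega) (by omega)]
    simp only [List.foldl_cons, List.foldl_nil]
    have hym : m < y.length := by omega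
    have hxm : m < x.length := by omega
    have hlt : (y.take m).length = m := by simp; omega
    rw [List.set_append_right _ _ (by omega), hlt]
    rw [List.drop_eq_getElem_cons hxm]
    simp only [Nat.sub_self, List.set_cons_zero]
    rw [List.getD_eq_getElem y 0 hym, List.take_succ_eq_append_getElem hym,
      List.append_assoc]
    rfl

theorem copy_eq (y x : List Int) (m : Nat) (hx : m ≤ x.length) (hy : m ≤ y.length) :
    (PySem.List.pyRange 0 (m : Int)).foldl
      (fun f i => PySem.List.pySetD f i (PySem.List.pyGetD y i 0)) x
      = y.take m ++ x.drop m := by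
  rw [PySem.List.pyRange_zero_natCast, List.foldl_map]
  simp only [PySem.List.pySetD_natCast, PySem.List.pyGetD_natCast]
  exact copyNat y x m hx hy

theorem repair_eq (x y : List Int) (p : Int) (hlen : x.length = y.length) (hp0 : 0 ≤ p)
    (hpn : p ≤ (x.length : Int)) :
    ((PySem.List.pyRange p (y.length : Int)).foldl (stepA x p)
      ((PySem.List.pyRange 0 p).foldl
        (fun f i => PySem.List.pySetD f i (PySem.List.pyGetD y i 0)) x, (0 : Int))).1
      = repairB x y p := by
  obtain ⟨pn, rfl⟩ := Int.eq_ofNat_of_zero_le hp0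
  have hpnx : pn ≤ x.length := by exact_mod_cast hpn
  have hpny : pn ≤ y.length := by omega
  have hl : (y.take pn).length = pn := by simp; omega
  have hcopy := copy_eq y x pn hpnx hpny
  simp only [repairB, PySem.List.slice_to y (by positivity : (0:Int) ≤ (pn : Int)),
    PySem.List.slice_from x (by positivity : (0:Int) ≤ (pn : Int)), Int.toNat_natCast]
  rw [hcopy]
  have hinit : RelAB x y (pn : Int) (y.take pn ++ x.drop pn, (0 : Int))
      (y.take pn ++ x.drop pn, PySem.Set.ofList (y.take pn ++ x.drop pn), 0) := by
    unfold RelAB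
    dsimp only
    simp only [Int.toNat_natCast]
    refine ⟨by trivial, ?_, ?_, ?_, by omega, by omega, ?_, Or.inl (by omega)⟩
    · rw [List.take_left' hl]
    · simp
      omega
    · intro z
      exact PySem.Set.mem_ofList _ _
    · intro k _ hk2
      exact absurd hk2 (by omega)
  have hb : ∀ i ∈ PySem.List.pyRange (pn : Int) (y.length : Int),
      (pn : Int) ≤ i ∧ i < (x.length : Int) := by
    intro i hi
    rw [PySem.List.mem_pyRange_one] at hi
    omega
  have hrel := fold_rel x y (pn : Int) (PySem.List.pyRange (pn : Int) (y.length : Int)) hb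
    (by positivity) _ _ hinit
  simp only [Int.toNat_natCast] at hrel
  exact hrel.1

-- ===== VERDICT (by name: the statement is the Claim_ definition above) =====
theorem combina_spec : Claim_equal_combina := by
  intro cross1 cross2 p _hdom hpre
  obtain ⟨hlen, hp0, hpn⟩ := hpre
  unfold Spec_combina combina combina_alt
  dsimp only
  have hpn2 : p ≤ (cross2.length : Int) := by rw [← hlen]; exact hpn
  refine Prod.ext ?_ ?_
  · exact repair_eq cross1 cross2 p hlen hp0 hpn
  · exact repair_eq cross2 cross1 p hlen.symm hp0 hpn2
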